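-- pv_equiv track=rewrite | github.com/man-group/ArcticDB | build_tooling/sbom_scan/generate_report.py | classify_bsl_compat
-- ===== SOURCE A (Python) =====
-- BSL_COMPAT: dict[str, str] = {
--     # Permissive — attribution required, no copyleft concerns
--     "MIT": "permissive",
--     "MIT License": "permissive",
--     "BSD-2-Clause": "permissive",
--     "BSD-3-Clause": "permissive",
--     "BSD License": "permissive",
--     "Apache-2.0": "permissive",
--     "Apache Software License": "permissive",
--     "ISC": "permissive",
--     "Zlib": "permissive",
--     "zlib/libpng": "permissive",
--     "curl": "permissive",
--     "Unlicense": "permissive",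
--     "BSL-1.0": "permissive",         # Boost — permissive
--     "OLDAP-2.8": "permissive",       # OpenLDAP — permissive with attribution
--     "OpenSSL": "permissive",         # OpenSSL legacy (now Apache-2.0)
--     "PSF-2.0": "permissive",         # Python Software Foundation
--     "PSF License": "permissive",
--     "bzip2-1.0.6": "permissive",     # bzip2 — BSD-like, no copyleft
--     "CC0-1.0": "permissive",
--     "Public Domain": "permissive",
--     "Proprietary": "unknown",        # e.g. ahl.pkglib — needs case-by-case review
--     # Weak copyleft — legal review required for binary distribution
--     "LGPL-2.1": "weak_copyleft",     # Requires ability to relink (binary dist concern)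
--     "LGPL-3.0": "weak_copyleft",
--     "LGPL-2.1-only": "weak_copyleft",
--     "LGPL-3.0-only": "weak_copyleft",
--     "MPL-2.0": "weak_copyleft",      # File-level copyleft; manageable if not modified
--     "Mozilla Public License 2.0 (MPL 2.0)": "weak_copyleft",
--     "CDDL-1.0": "weak_copyleft",
--     # Strong copyleft — incompatible with BSL-1.1 distribution
--     "GPL-2.0": "strong_copyleft",
--     "GPL-3.0": "strong_copyleft",
--     "AGPL-3.0": "strong_copyleft",
--     "GPL-2.0-only": "strong_copyleft",
--     "GPL-3.0-only": "strong_copyleft",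
--     "AGPL-3.0-only": "strong_copyleft",
-- }
--
-- def classify_bsl_compat(license_str: str) -> str:
--     """Classify a license string for BSL-1.1 compatibility.
--     Returns one of: permissive, weak_copyleft, strong_copyleft, unknown.
--     """
--     if not license_str or license_str.lower() in ("unknown", ""):
--         return "unknown"
--     # Check exact matches first
--     if license_str in BSL_COMPAT:
--         return BSL_COMPAT[license_str]
--     # Check partial matches (handles compound licenses like "Apache Software License; BSD License")
--     result = "permissive"  # default if any match found
--     matched = False
--     for lic_key, compat in BSL_COMPAT.items():
--         if lic_key.lower() in license_str.lower():
--             matched = True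
--             # Escalate severity: strong > weak > permissive > unknown
--             if compat == "strong_copyleft":
--                 return "strong_copyleft"
--             if compat == "weak_copyleft":
--                 result = "weak_copyleft"
--             elif compat == "unknown" and result == "permissive":
--                 result = "unknown"
--     return result if matched else "unknown"
-- ===== SOURCE B (Python) =====
-- BSL_COMPAT: dict[str, str] = {
--     "MIT": "permissive",
--     "MIT License": "permissive",
--     "BSD-2-Clause": "permissive",
--     "BSD-3-Clause": "permissive",
--     "BSD License": "permissive",
--     "Apache-2.0": "permissive",
--     "Apache Software License": "permissive",
--     "ISC": "permissive",
--     "Zlib": "permissive",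
--     "zlib/libpng": "permissive",
--     "curl": "permissive",
--     "Unlicense": "permissive",
--     "BSL-1.0": "permissive",
--     "OLDAP-2.8": "permissive",
--     "OpenSSL": "permissive",
--     "PSF-2.0": "permissive",
--     "PSF License": "permissive",
--     "bzip2-1.0.6": "permissive",
--     "CC0-1.0": "permissive",
--     "Public Domain": "permissive",
--     "Proprietary": "unknown",
--     "LGPL-2.1": "weak_copyleft",
--     "LGPL-3.0": "weak_copyleft",
--     "LGPL-2.1-only": "weak_copyleft",
--     "LGPL-3.0-only": "weak_copyleft",
--     "MPL-2.0": "weak_copyleft",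
--     "Mozilla Public License 2.0 (MPL 2.0)": "weak_copyleft",
--     "CDDL-1.0": "weak_copyleft",
--     "GPL-2.0": "strong_copyleft",
--     "GPL-3.0": "strong_copyleft",
--     "AGPL-3.0": "strong_copyleft",
--     "GPL-2.0-only": "strong_copyleft",
--     "GPL-3.0-only": "strong_copyleft",
--     "AGPL-3.0-only": "strong_copyleft",
-- }
--
-- # The table regrouped once, by decreasing severity: each tier is its pre-lowercased keys.
-- _SEVERITY_ORDER = ["strong_copyleft", "weak_copyleft", "unknown", "permissive"]
-- TIERS: list[tuple[str, list[str]]] = [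
--     (label, [k.lower() for k, v in BSL_COMPAT.items() if v == label])
--     for label in _SEVERITY_ORDER
-- ]
--
--
-- def classify_bsl_compat(license_str: str) -> str:
--     """Classify a license string for BSL-1.1 compatibility.
--     Returns one of: permissive, weak_copyleft, strong_copyleft, unknown.
--     """
--     if not license_str or license_str.lower() in ("unknown", ""):
--         return "unknown"
--     if license_str in BSL_COMPAT:
--         return BSL_COMPAT[license_str]
--     low = license_str.lower()
--     for label, keys in TIERS:
--         if any(k in low for k in keys):
--             return label
--     return "unknown"
-- ===== Notes on version B (the rewrite author's own statement) =====
-- stated objective: alternative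
-- what changed: Instead of A's single escalating pass over the whole table with a mutated result/matched state, B regroups the table once at module load into severity tiers of pre-lowercased keys (strong > weak > unknown > permissive) and returns the label of the first tier containing any substring match, falling back to the unmatched default.
import Mathlib
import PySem

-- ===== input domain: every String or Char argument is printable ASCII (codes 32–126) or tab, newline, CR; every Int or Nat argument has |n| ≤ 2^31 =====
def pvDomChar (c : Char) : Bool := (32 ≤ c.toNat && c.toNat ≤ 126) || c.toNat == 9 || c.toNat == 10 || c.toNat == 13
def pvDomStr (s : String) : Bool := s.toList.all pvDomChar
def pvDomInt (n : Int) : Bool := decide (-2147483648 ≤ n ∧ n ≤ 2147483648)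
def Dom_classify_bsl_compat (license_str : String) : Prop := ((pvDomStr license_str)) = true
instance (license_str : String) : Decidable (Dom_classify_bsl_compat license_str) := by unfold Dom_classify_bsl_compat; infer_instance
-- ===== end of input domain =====

-- B replaces A's escalating single pass (mutable result/matched, early return) by a table
-- regrouped once into severity tiers of pre-lowercased keys, searched in priority order.

-- the module-level dict BSL_COMPAT, in insertion order
def BSL_COMPAT : List (String × String) := [
  ("MIT", "permissive"), ("MIT License", "permissive"),
  ("BSD-2-Clause", "permissive"), ("BSD-3-Clause", "permissive"),
  ("BSD License", "permissive"), ("Apache-2.0", "permissive"),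
  ("Apache Software License", "permissive"), ("ISC", "permissive"),
  ("Zlib", "permissive"), ("zlib/libpng", "permissive"),
  ("curl", "permissive"), ("Unlicense", "permissive"),
  ("BSL-1.0", "permissive"), ("OLDAP-2.8", "permissive"),
  ("OpenSSL", "permissive"), ("PSF-2.0", "permissive"),
  ("PSF License", "permissive"), ("bzip2-1.0.6", "permissive"),
  ("CC0-1.0", "permissive"), ("Public Domain", "permissive"),
  ("Proprietary", "unknown"),
  ("LGPL-2.1", "weak_copyleft"), ("LGPL-3.0", "weak_copyleft"),
  ("LGPL-2.1-only", "weak_copyleft"), ("LGPL-3.0-only", "weak_copyleft"),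
  ("MPL-2.0", "weak_copyleft"),
  ("Mozilla Public License 2.0 (MPL 2.0)", "weak_copyleft"),
  ("CDDL-1.0", "weak_copyleft"),
  ("GPL-2.0", "strong_copyleft"), ("GPL-3.0", "strong_copyleft"),
  ("AGPL-3.0", "strong_copyleft"), ("GPL-2.0-only", "strong_copyleft"),
  ("GPL-3.0-only", "strong_copyleft"), ("AGPL-3.0-only", "strong_copyleft")]

-- ===== PORT A =====
-- A's partial-match loop: mutable result/matched, early return on strong_copyleft
def loopA : List (String × String) → String → String → Bool → String
  | [], _, result, matched => if matched then result else "unknown"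
  | (k, c) :: rest, low, result, matched =>
    if PySem.Str.isIn (PySem.Str.lower k) low then
      if c = "strong_copyleft" then "strong_copyleft"
      else
        loopA rest low
          (if c = "weak_copyleft" then "weak_copyleft"
           else if c = "unknown" ∧ result = "permissive" then "unknown" else result)
          true
    else loopA rest low result matched

def classify_bsl_compat (license_str : String) : String :=
  if license_str = "" ∨ PySem.Str.lower license_str = "unknown" ∨ PySem.Str.lower license_str = "" then "unknown"
  else match PySem.Dict.get? (PySem.Dict.ofList BSL_COMPAT) license_str with
  | some v => v
  | none => loopA BSL_COMPAT (PySem.Str.lower license_str) "permissive" false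

-- ===== PORT B =====
-- Source B's module-level TIERS: the table regrouped by decreasing severity, keys pre-lowercased
def tierKeys (label : String) : List String :=
  (BSL_COMPAT.filter (fun p => p.2 == label)).map (fun p => PySem.Str.lower p.1)

def TIERS : List (String × List String) :=
  ["strong_copyleft", "weak_copyleft", "unknown", "permissive"].map (fun lab => (lab, tierKeys lab))

-- Source B's for loop: return the label of the first tier with any substring match
def tierLoop : List (String × List String) → String → String
  | [], _ => "unknown"
  | (lab, keys) :: rest, low =>
    if keys.any (fun k => PySem.Str.isIn k low) then lab else tierLoop rest low

def classify_bsl_compat_alt (license_str : String) : String :=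
  if license_str = "" ∨ PySem.Str.lower license_str = "unknown" ∨ PySem.Str.lower license_str = "" then "unknown"
  else match PySem.Dict.get? (PySem.Dict.ofList BSL_COMPAT) license_str with
  | some v => v
  | none => tierLoop TIERS (PySem.Str.lower license_str)

-- ===== PRECONDITION & SPEC =====
def Spec_classify_bsl_compat (license_str : String) (out : String) : Prop := out = classify_bsl_compat_alt license_str
instance (license_str : String) (out : String) : Decidable (Spec_classify_bsl_compat license_str out) := by unfold Spec_classify_bsl_compat; infer_instance

-- ===== CLAIM (what is proved, stated in full; the proofs are below) =====
def Claim_equal_classify_bsl_compat : Prop := ∀ (license_str : String), Dom_classify_bsl_compat license_str → Spec_classify_bsl_compat license_str (classify_bsl_compat license_str)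

-- ===== LEMMAS AND PROOFS =====

-- the list of compat labels whose key matches as a substring (characterises A's loop)
def matchedLabels (l : List (String × String)) (low : String) : List String :=
  l.filterMap (fun p => if PySem.Str.isIn (PySem.Str.lower p.1) low then some p.2 else none)

-- A's loop, characterised by which labels are matched
set_option maxHeartbeats 1600000 in
set_option maxRecDepth 8192 in
theorem loopA_eq (l : List (String × String)) (low : String) :
    ∀ (result : String) (matched : Bool), (matched = false → result = "permissive") →
    (result = "permissive" ∨ result = "weak_copyleft" ∨ result = "unknown") →
    loopA l low result matched =
      (if "strong_copyleft" ∈ matchedLabels l low then "strong_copyleft"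
       else if result = "weak_copyleft" ∨ "weak_copyleft" ∈ matchedLabels l low then "weak_copyleft"
       else if result = "unknown" ∨ "unknown" ∈ matchedLabels l low then "unknown"
       else if matched = true ∨ matchedLabels l low ≠ [] then result
       else "unknown") := by
  induction l with
  | nil =>
    intro result matched hinv hres
    cases matched with
    | false => simp [loopA, matchedLabels, hinv rfl]
    | true =>
      simp only [loopA, matchedLabels, List.filterMap_nil, List.not_mem_nil, or_false, ne_eq,
        not_true_eq_false, if_true]
      by_cases h1 : result = "weak_copyleft" <;> by_cases h2 : result = "unknown" <;>
        simp [h1, h2]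
  | cons p rest ih =>
    intro result matched hinv hres
    obtain ⟨k, c⟩ := p
    have e1 : loopA ((k, c) :: rest) low result matched =
        (if PySem.Str.isIn (PySem.Str.lower k) low then
          (if c = "strong_copyleft" then "strong_copyleft"
           else loopA rest low
             (if c = "weak_copyleft" then "weak_copyleft"
              else if c = "unknown" ∧ result = "permissive" then "unknown" else result) true)
         else loopA rest low result matched) := rfl
    by_cases hin : PySem.Str.isIn (PySem.Str.lower k) low = true
    · have mcons : matchedLabels ((k, c) :: rest) low = c :: matchedLabels rest low := by
        unfold matchedLabels
        rw [List.filterMap_cons, if_pos hin]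
      by_cases hs : c = "strong_copyleft"
      · rw [e1, if_pos hin, if_pos hs, mcons, hs]
        simp
      · rw [e1, if_pos hin, if_neg hs, ih _ true (fun h => by cases h)
              (by by_cases hw : c = "weak_copyleft" <;> by_cases hu : c = "unknown" <;>
                    by_cases hrp : result = "permissive" <;> simp_all), mcons]
        by_cases h1 : "strong_copyleft" ∈ matchedLabels rest low
        · simp [h1]
        · have hsc : ¬ "strong_copyleft" ∈ c :: matchedLabels rest low := by
            simp [h1, eq_comm, hs]
          by_cases hw : c = "weak_copyleft" <;>
            by_cases hu : c = "unknown" <;>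
            by_cases hrp : result = "permissive" <;>
            by_cases hrw : result = "weak_copyleft" <;>
            by_cases hru : result = "unknown" <;>
            simp_all [show ("weak_copyleft" = c) = (c = "weak_copyleft") from propext eq_comm,
              show ("unknown" = c) = (c = "unknown") from propext eq_comm]
    · have hin' : PySem.Str.isIn (PySem.Str.lower k) low = false := by
        cases h : PySem.Str.isIn (PySem.Str.lower k) low
        · rfl
        · exact absurd h hin
      have mcons : matchedLabels ((k, c) :: rest) low = matchedLabels rest low := by
        unfold matchedLabels
        rw [List.filterMap_cons, if_neg (by rw [hin']; exact Bool.false_ne_true)]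
      rw [e1, if_neg (by rw [hin']; exact Bool.false_ne_true), ih result matched hinv hres, mcons]

-- membership of a label among the matched labels = a substring match within that label's tier
theorem mem_matchedLabels (l : List (String × String)) (low c : String) :
    c ∈ matchedLabels l low ↔
      (l.filter (fun p => p.2 == c)).any (fun p => PySem.Str.isIn (PySem.Str.lower p.1) low) = true := by
  induction l with
  | nil => simp [matchedLabels]
  | cons p rest ih =>
    obtain ⟨k, v⟩ := p
    rw [List.filter_cons]
    by_cases hin : PySem.Str.isIn (PySem.Str.lower k) low = true
    · have m1 : matchedLabels ((k, v) :: rest) low = v :: matchedLabels rest low := by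
        unfold matchedLabels
        rw [List.filterMap_cons, if_pos hin]
      rw [m1]
      by_cases hv : v = c
      · subst hv
        rw [if_pos (by simp), List.any_cons]
        constructor
        · intro _
          simp only [hin, Bool.true_or]
        · intro _
          exact List.mem_cons_self
      · rw [if_neg (by simp [hv])]
        have hcv : ¬ c = v := fun h => hv h.symm
        simp only [List.mem_cons, hcv, false_or]
        exact ih
    · have m1 : matchedLabels ((k, v) :: rest) low = matchedLabels rest low := by
        unfold matchedLabels
        rw [List.filterMap_cons, if_neg hin]
      rw [m1]
      have hin' : PySem.Str.isIn (PySem.Str.lower k) low = false := by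
        cases h : PySem.Str.isIn (PySem.Str.lower k) low
        · rfl
        · exact absurd h hin
      by_cases hv : v = c
      · subst hv
        rw [if_pos (by simp), List.any_cons]
        rw [hin', Bool.false_or]
        exact ih
      · rw [if_neg (by simp [hv])]
        exact ih

-- the matched-label list is non-empty iff some key of the whole table matches
theorem matchedLabels_ne_nil (l : List (String × String)) (low : String) :
    matchedLabels l low ≠ [] ↔
      l.any (fun p => PySem.Str.isIn (PySem.Str.lower p.1) low) = true := by
  induction l with
  | nil => simp [matchedLabels]
  | cons p rest ih =>
    obtain ⟨k, v⟩ := p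
    unfold matchedLabels
    rw [List.filterMap_cons]
    by_cases hin : PySem.Str.isIn (PySem.Str.lower k) low = true <;> simp_all [matchedLabels]

-- any over a list whose labels are among the four = disjunction of any over the four tiers
theorem any_split (l : List (String × String))
    (h : ∀ p ∈ l, p.2 = "strong_copyleft" ∨ p.2 = "weak_copyleft" ∨ p.2 = "unknown" ∨ p.2 = "permissive")
    (m : String × String → Bool) :
    l.any m =
      ((l.filter (fun p => p.2 == "strong_copyleft")).any m ||
       (l.filter (fun p => p.2 == "weak_copyleft")).any m ||
       (l.filter (fun p => p.2 == "unknown")).any m ||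
       (l.filter (fun p => p.2 == "permissive")).any m) := by
  induction l with
  | nil => simp
  | cons p rest ih =>
    have hp := h p (List.mem_cons_self)
    have hr := ih (fun q hq => h q (List.mem_cons_of_mem _ hq))
    rw [List.any_cons, List.filter_cons, List.filter_cons, List.filter_cons, List.filter_cons]
    rcases hp with h1 | h1 | h1 | h1 <;>
      · simp only [h1, String.reduceEq, beq_self_eq_true, beq_iff_eq, if_true, if_false,
          List.any_cons, hr]
        cases m p <;> simp [Bool.or_comm, Bool.or_left_comm]

-- a tier's any-match = any-match over the corresponding filtered table slice
theorem tierKeys_any (label low : String) :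
    (tierKeys label).any (fun k => PySem.Str.isIn k low) =
      (BSL_COMPAT.filter (fun p => p.2 == label)).any
        (fun p => PySem.Str.isIn (PySem.Str.lower p.1) low) := by
  unfold tierKeys
  rw [List.any_map]
  rfl

-- the partial-match branch: A's loop over the table = B's tier search
set_option maxHeartbeats 1600000 in
set_option maxRecDepth 8192 in
theorem loopA_eq_tierLoop (low : String) :
    loopA BSL_COMPAT low "permissive" false = tierLoop TIERS low := by
  rw [loopA_eq BSL_COMPAT low "permissive" false (fun _ => rfl) (Or.inl rfl)]
  have hB : tierLoop TIERS low =
      (if (tierKeys "strong_copyleft").any (fun k => PySem.Str.isIn k low) then "strong_copyleft"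
       else if (tierKeys "weak_copyleft").any (fun k => PySem.Str.isIn k low) then "weak_copyleft"
       else if (tierKeys "unknown").any (fun k => PySem.Str.isIn k low) then "unknown"
       else if (tierKeys "permissive").any (fun k => PySem.Str.isIn k low) then "permissive"
       else "unknown") := rfl
  have hall : ∀ p ∈ BSL_COMPAT, p.2 = "strong_copyleft" ∨ p.2 = "weak_copyleft" ∨
      p.2 = "unknown" ∨ p.2 = "permissive" := by
    intro p hp
    fin_cases hp <;> simp
  have hsplit := any_split BSL_COMPAT hall (fun p => PySem.Str.isIn (PySem.Str.lower p.1) low)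
  have eS : ("strong_copyleft" ∈ matchedLabels BSL_COMPAT low) ↔
      ((tierKeys "strong_copyleft").any (fun k => PySem.Str.isIn k low) = true) := by
    rw [mem_matchedLabels, tierKeys_any]
  have eW : ("weak_copyleft" ∈ matchedLabels BSL_COMPAT low) ↔
      ((tierKeys "weak_copyleft").any (fun k => PySem.Str.isIn k low) = true) := by
    rw [mem_matchedLabels, tierKeys_any]
  have eU : ("unknown" ∈ matchedLabels BSL_COMPAT low) ↔
      ((tierKeys "unknown").any (fun k => PySem.Str.isIn k low) = true) := by
    rw [mem_matchedLabels, tierKeys_any]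
  have eM : (matchedLabels BSL_COMPAT low ≠ []) ↔
      ((tierKeys "strong_copyleft").any (fun k => PySem.Str.isIn k low) = true ∨
       (tierKeys "weak_copyleft").any (fun k => PySem.Str.isIn k low) = true ∨
       (tierKeys "unknown").any (fun k => PySem.Str.isIn k low) = true ∨
       (tierKeys "permissive").any (fun k => PySem.Str.isIn k low) = true) := by
    rw [matchedLabels_ne_nil, hsplit]
    simp only [Bool.or_eq_true, or_assoc, ← tierKeys_any]
  rw [hB]
  simp only [String.reduceEq, false_or, Bool.false_eq_true]
  simp only [eS, eW, eU, eM]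
  by_cases hS : (tierKeys "strong_copyleft").any (fun k => PySem.Str.isIn k low) = true
  · rw [if_pos hS, if_pos hS]
  · rw [if_neg hS, if_neg hS]
    by_cases hW : (tierKeys "weak_copyleft").any (fun k => PySem.Str.isIn k low) = true
    · rw [if_pos hW, if_pos hW]
    · rw [if_neg hW, if_neg hW]
      by_cases hU : (tierKeys "unknown").any (fun k => PySem.Str.isIn k low) = true
      · rw [if_pos hU, if_pos hU]
      · rw [if_neg hU, if_neg hU]
        by_cases hP : (tierKeys "permissive").any (fun k => PySem.Str.isIn k low) = true
        · rw [if_pos (Or.inr (Or.inr (Or.inr hP))), if_pos hP]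
        · rw [if_neg (fun h => h.elim hS (fun h' => h'.elim hW (fun h'' => h''.elim hU hP))),
            if_neg hP]

-- ===== VERDICT (by name: the statement is the Claim_ definition above) =====
theorem classify_bsl_compat_spec : Claim_equal_classify_bsl_compat := by
  intro s _
  unfold Spec_classify_bsl_compat classify_bsl_compat classify_bsl_compat_alt
  by_cases hg : s = "" ∨ PySem.Str.lower s = "unknown" ∨ PySem.Str.lower s = ""
  · simp [hg]
  · simp only [hg, if_false]
    cases PySem.Dict.get? (PySem.Dict.ofList BSL_COMPAT) s with
    | some v => rfl
    | none => exact loopA_eq_tierLoop (PySem.Str.lower s)
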